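-- pv_equiv track=rewrite | github.com/kivix221/IMO | global_convexity/helpers.py | calc_shared_edges
-- ===== SOURCE A (Python) =====
-- def calc_shared_edges(cycle,cycle_ref):
--     shared_edges = 0
--     for i in range(len(cycle)):
--             for j in range(len(cycle_ref)):
--                 #(a,b) = (c,d)
--                 is_exist = (cycle[i][0] == cycle_ref[j][0]) and (cycle[i][1] == cycle_ref[j][1])
--                 #(a,b) = (d,c) może być kolejność odwrócona wierzchołków
--                 is_exist_inverse = (cycle[i][0] == cycle_ref[j][1]) and (cycle[i][1] == cycle_ref[j][0])
--
--                 if is_exist or is_exist_inverse: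
--                   shared_edges += 1
--
--     return shared_edges
-- ===== SOURCE B (Python) =====
-- def calc_shared_edges(cycle, cycle_ref):
--     # Canonicalize edges (orientation-independent), sort, then one two-pointer
--     # merge pass multiplying equal-group sizes.
--     xs = sorted((a, b) if a <= b else (b, a) for a, b in cycle)
--     ys = sorted((a, b) if a <= b else (b, a) for a, b in cycle_ref)
--     i = j = 0
--     total = 0
--     while i < len(xs) and j < len(ys):
--         if xs[i] < ys[j]:
--             i += 1
--         elif ys[j] < xs[i]:
--             j += 1
--         else:
--             v = xs[i]
--             c1 = 0
--             while i < len(xs) and xs[i] == v: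
--                 i += 1
--                 c1 += 1
--             c2 = 0
--             while j < len(ys) and ys[j] == v:
--                 j += 1
--                 c2 += 1
--             total += c1 * c2
--     return total
-- ===== Notes on version B (the rewrite author's own statement) =====
-- stated objective: faster
-- what changed: Replaces A's nested O(n*m) double scan with canonicalizing each edge to a sorted 2-tuple, sorting both canonical lists, and counting matches in a single two-pointer merge pass that adds the product of equal-group sizes.
import Mathlib
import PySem

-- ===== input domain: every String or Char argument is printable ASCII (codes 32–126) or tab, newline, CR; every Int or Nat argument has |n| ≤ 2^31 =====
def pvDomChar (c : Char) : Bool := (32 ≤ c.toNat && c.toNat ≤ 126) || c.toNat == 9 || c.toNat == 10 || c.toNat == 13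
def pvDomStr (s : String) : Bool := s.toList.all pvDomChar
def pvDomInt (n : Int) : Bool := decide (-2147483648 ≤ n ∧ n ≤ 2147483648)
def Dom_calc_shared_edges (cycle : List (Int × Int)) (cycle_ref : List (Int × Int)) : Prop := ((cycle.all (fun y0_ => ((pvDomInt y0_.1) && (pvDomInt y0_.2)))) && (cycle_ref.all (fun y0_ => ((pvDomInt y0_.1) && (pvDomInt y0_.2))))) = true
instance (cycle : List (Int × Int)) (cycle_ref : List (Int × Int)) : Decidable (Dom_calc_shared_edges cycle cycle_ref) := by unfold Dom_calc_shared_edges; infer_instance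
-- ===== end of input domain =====

-- B replaces A's nested quadratic scan by canonicalize + sort + one two-pointer merge
-- pass (objective: faster, O((n+m)·log) vs O(n·m)); return values agree on all inputs.

-- ===== PORT A =====
-- A: nested loops over both lists, +1 whenever the edges match forward or reversed.
def calc_shared_edges (cycle : List (Int × Int)) (cycle_ref : List (Int × Int)) : Int :=
  cycle.foldl (fun shared_edges ci =>
    cycle_ref.foldl (fun se cj =>
      let is_exist := ci.1 == cj.1 && ci.2 == cj.2
      let is_exist_inverse := ci.1 == cj.2 && ci.2 == cj.1
      if is_exist || is_exist_inverse then se + 1 else se) shared_edges) 0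

-- ===== PORT B =====
-- canonical (orientation-independent) form of an edge: the sorted 2-tuple
def pvCanon (e : Int × Int) : Int × Int := if e.1 ≤ e.2 then e else (e.2, e.1)

-- Python's `<` on 2-tuples of ints (lexicographic)
def pvLt (x y : Int × Int) : Bool := x.1 < y.1 || (x.1 == y.1 && x.2 < y.2)

-- the two-pointer merge pass of Source B: on equal heads, consume both equal groups
-- and add the product of the group sizes
def pvMergeCount : List (Int × Int) → List (Int × Int) → Int
  | [], _ => 0
  | _ :: _, [] => 0
  | x :: xs, y :: ys =>
    if pvLt x y then pvMergeCount xs (y :: ys)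
    else if pvLt y x then pvMergeCount (x :: xs) ys
    else
      (((x :: xs).takeWhile (· == x)).length : Int) * (((y :: ys).takeWhile (· == x)).length : Int)
        + pvMergeCount ((x :: xs).dropWhile (· == x)) ((y :: ys).dropWhile (· == x))
termination_by l1 l2 => l1.length + l2.length
decreasing_by all_goals
  try simp only [List.length_cons, List.dropWhile_cons, beq_self_eq_true, if_true, beq_iff_eq]
  all_goals try omega
  all_goals
    have h1 := List.length_dropWhile_le (p := (· == x)) (l := xs)
    have h2 := List.length_dropWhile_le (p := (· == x)) (l := ys)
    split <;> simp <;> omega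

-- Source B: sort both canonicalized lists (Python sorts by `<`), then merge-count
def calc_shared_edges_alt (cycle : List (Int × Int)) (cycle_ref : List (Int × Int)) : Int :=
  pvMergeCount ((cycle.map pvCanon).mergeSort (fun a b => !pvLt b a))
               ((cycle_ref.map pvCanon).mergeSort (fun a b => !pvLt b a))

-- ===== PRECONDITION & SPEC =====
def Spec_calc_shared_edges (cycle : List (Int × Int)) (cycle_ref : List (Int × Int)) (out : Int) : Prop := out = calc_shared_edges_alt cycle cycle_ref
instance (cycle : List (Int × Int)) (cycle_ref : List (Int × Int)) (out : Int) : Decidable (Spec_calc_shared_edges cycle cycle_ref out) := by unfold Spec_calc_shared_edges; infer_instance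

-- ===== CLAIM (what is proved, stated in full; the proofs are below) =====
def Claim_equal_calc_shared_edges : Prop := ∀ (cycle : List (Int × Int)) (cycle_ref : List (Int × Int)), Dom_calc_shared_edges cycle cycle_ref → Spec_calc_shared_edges cycle cycle_ref (calc_shared_edges cycle cycle_ref)

-- ===== LEMMAS AND PROOFS =====

-- multiplicity-weighted overlap: Σ_{x ∈ l1} (number of copies of x in l2)
def pvS (l1 l2 : List (Int × Int)) : Int := (l1.map (fun x => ((l2.count x : Nat) : Int))).sum

theorem pvLt_iff (x y : Int × Int) : pvLt x y = true ↔ (x.1 < y.1 ∨ (x.1 = y.1 ∧ x.2 < y.2)) := by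
  simp [pvLt]

theorem pvLt_eq_of_not {x y : Int × Int} (h1 : ¬ pvLt x y = true) (h2 : ¬ pvLt y x = true) : x = y := by
  rw [pvLt_iff] at h1 h2
  rcases x with ⟨a, b⟩; rcases y with ⟨c, d⟩
  simp at h1 h2 ⊢; omega

theorem pvMatch_canon (ci cj : Int × Int) :
    ((ci.1 == cj.1 && ci.2 == cj.2) || (ci.1 == cj.2 && ci.2 == cj.1)) = (pvCanon cj == pvCanon ci) := by
  rcases ci with ⟨a, b⟩; rcases cj with ⟨c, d⟩
  rw [Bool.eq_iff_iff]
  simp only [Bool.or_eq_true, Bool.and_eq_true, beq_iff_eq, pvCanon]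
  split_ifs <;> simp_all [Prod.ext_iff] <;> omega

theorem pvFoldl_count {α : Type} (p : α → Bool) (l : List α) (acc : Int) :
    l.foldl (fun a e => if p e then a + 1 else a) acc = acc + (l.countP p : Nat) := by
  induction l generalizing acc with
  | nil => simp
  | cons e t ih => by_cases h : p e <;> simp [h, ih] <;> omega

theorem pvA_char (c r : List (Int × Int)) :
    calc_shared_edges c r = pvS (c.map pvCanon) (r.map pvCanon) := by
  unfold calc_shared_edges pvS
  rw [List.map_map]
  suffices h : ∀ acc : Int,
      c.foldl (fun shared_edges ci =>
        r.foldl (fun se cj =>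
          let is_exist := ci.1 == cj.1 && ci.2 == cj.2
          let is_exist_inverse := ci.1 == cj.2 && ci.2 == cj.1
          if is_exist || is_exist_inverse then se + 1 else se) shared_edges) acc
      = acc + (c.map ((fun x => ((List.count x (r.map pvCanon) : Nat) : Int)) ∘ pvCanon)).sum by
    simpa using h 0
  intro acc
  induction c generalizing acc with
  | nil => simp
  | cons ci ct ih =>
    simp only [List.foldl_cons, List.map_cons, List.sum_cons, Function.comp]
    rw [ih, pvFoldl_count (fun cj => (ci.1 == cj.1 && ci.2 == cj.2) || (ci.1 == cj.2 && ci.2 == cj.1)) r acc]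
    have : r.countP (fun cj => (ci.1 == cj.1 && ci.2 == cj.2) || (ci.1 == cj.2 && ci.2 == cj.1))
        = List.count (pvCanon ci) (r.map pvCanon) := by
      rw [List.count, List.countP_map]
      exact List.countP_congr (fun cj _ => by rw [pvMatch_canon ci cj]; exact Iff.rfl)
    rw [this]; ring

-- sortedness predicate produced by mergeSort with `le = fun a b => !pvLt b a`
def pvSorted (l : List (Int × Int)) : Prop := l.Pairwise (fun a b => (!pvLt b a) = true)

theorem pvLe_iff {a b : Int × Int} : (!pvLt b a) = true ↔ ¬ pvLt b a = true := by
  simp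

theorem pvS_cons (x : Int × Int) (l1 l2 : List (Int × Int)) :
    pvS (x :: l1) l2 = (l2.count x : Nat) + pvS l1 l2 := by simp [pvS]

theorem pvS_append (a b l2 : List (Int × Int)) : pvS (a ++ b) l2 = pvS a l2 + pvS b l2 := by
  simp [pvS]

theorem pvS_congr_right {l1 l2 l2' : List (Int × Int)}
    (h : ∀ z ∈ l1, l2.count z = l2'.count z) : pvS l1 l2 = pvS l1 l2' := by
  unfold pvS
  congr 1
  exact List.map_congr_left (fun z hz => by rw [h z hz])

theorem pvS_const {t : List (Int × Int)} {x : Int × Int} (h : ∀ z ∈ t, z = x)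
    (l2 : List (Int × Int)) : pvS t l2 = (t.length : Int) * (l2.count x : Nat) := by
  induction t with
  | nil => simp [pvS]
  | cons a t ih =>
    rw [pvS_cons, h a (by simp), ih (fun z hz => h z (by simp [hz]))]
    push_cast [List.length_cons]; ring

-- elements of dropWhile (· == x) on a sorted list all-≥-x are strictly greater than x
theorem pvDropWhile_gt {l : List (Int × Int)} {x : Int × Int}
    (hs : pvSorted l) (hge : ∀ z ∈ l, ¬ pvLt z x = true) :
    ∀ z ∈ l.dropWhile (· == x), pvLt x z = true := by
  induction l with
  | nil => simp
  | cons a t ih =>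
    by_cases ha : a = x
    · subst ha
      rw [List.dropWhile_cons_of_pos (by simp)]
      exact ih (List.pairwise_cons.mp hs).2 (fun z hz => hge z (by simp [hz]))
    · rw [List.dropWhile_cons_of_neg (by simpa using ha)]
      intro z hz
      rcases List.mem_cons.mp hz with rfl | hz'
      · have h1 := hge z (by simp)
        rw [pvLt_iff] at h1 ⊢
        rcases z with ⟨c, d⟩; rcases x with ⟨e, f⟩
        simp [Prod.ext_iff] at h1 ha ⊢; omega
      · have h1 := hge a (by simp)
        have h2 := (List.pairwise_cons.mp hs).1 z hz'
        rw [pvLe_iff] at h2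
        rw [pvLt_iff] at h1 h2 ⊢
        rcases z with ⟨c, d⟩; rcases x with ⟨e, f⟩; rcases a with ⟨g, k⟩
        simp [Prod.ext_iff] at h1 h2 ha ⊢; omega

theorem pvCount_eq_zero_of_gt {l : List (Int × Int)} {x : Int × Int}
    (h : ∀ z ∈ l, pvLt x z = true) : l.count x = 0 := by
  rw [List.count_eq_zero]
  intro hx
  have := h x hx
  rw [pvLt_iff] at this; omega

theorem pvMergeCount_eq (l1 l2 : List (Int × Int)) (h1 : pvSorted l1) (h2 : pvSorted l2) :
    pvMergeCount l1 l2 = pvS l1 l2 := by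
  fun_induction pvMergeCount l1 l2 with
  | case1 l2 => simp [pvS]
  | case2 x xs => simp [pvS, List.count_nil]
  | case3 x xs y ys hlt ih =>
    have hz : ∀ z ∈ y :: ys, pvLt x z = true := by
      intro z hz
      rcases List.mem_cons.mp hz with rfl | hz'
      · exact hlt
      · have h2' := (List.pairwise_cons.mp h2).1 z hz'
        rw [pvLe_iff] at h2'
        rw [pvLt_iff] at hlt h2' ⊢
        rcases z with ⟨c, d⟩; rcases x with ⟨e, f⟩; rcases y with ⟨g, k⟩
        simp at hlt h2' ⊢; omega
    rw [ih (List.pairwise_cons.mp h1).2 h2, pvS_cons, pvCount_eq_zero_of_gt hz]; simp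
  | case4 x xs y ys hnlt hlt ih =>
    rw [ih h1 (List.pairwise_cons.mp h2).2]
    apply pvS_congr_right
    intro z hz
    have hzy : z ≠ y := by
      intro h; subst h
      rcases List.mem_cons.mp hz with rfl | hz'
      · exact hnlt hlt
      · have := (List.pairwise_cons.mp h1).1 z hz'
        rw [pvLe_iff] at this
        rw [pvLt_iff] at hlt this
        rcases z with ⟨c, d⟩; rcases x with ⟨e, f⟩
        simp at hlt this; omega
    simp [Ne.symm hzy]
  | case5 x xs y ys hnlt hnlt' ih =>
    have hxy : y = x := pvLt_eq_of_not hnlt' hnlt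
    subst hxy
    set t1 := (y :: xs).takeWhile (· == y) with ht1
    set d1 := (y :: xs).dropWhile (· == y) with hd1
    set t2 := (y :: ys).takeWhile (· == y) with ht2
    set d2 := (y :: ys).dropWhile (· == y) with hd2
    have he1 : t1 ++ d1 = y :: xs := List.takeWhile_append_dropWhile
    have he2 : t2 ++ d2 = y :: ys := List.takeWhile_append_dropWhile
    have htx1 : ∀ z ∈ t1, z = y := fun z hz => by
      simpa using List.mem_takeWhile_imp hz
    have htx2 : ∀ z ∈ t2, z = y := fun z hz => by
      simpa using List.mem_takeWhile_imp hz
    have hge1 : ∀ z ∈ y :: xs, ¬ pvLt z y = true := by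
      intro z hz
      rcases List.mem_cons.mp hz with rfl | hz'
      · rw [pvLt_iff]; omega
      · have := (List.pairwise_cons.mp h1).1 z hz'
        rw [pvLe_iff] at this; exact this
    have hge2 : ∀ z ∈ y :: ys, ¬ pvLt z y = true := by
      intro z hz
      rcases List.mem_cons.mp hz with rfl | hz'
      · rw [pvLt_iff]; omega
      · have := (List.pairwise_cons.mp h2).1 z hz'
        rw [pvLe_iff] at this; exact this
    have hgt1 : ∀ z ∈ d1, pvLt y z = true := pvDropWhile_gt h1 hge1
    have hgt2 : ∀ z ∈ d2, pvLt y z = true := pvDropWhile_gt h2 hge2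
    have hs1 : pvSorted d1 := List.Pairwise.sublist (List.dropWhile_sublist _) h1
    have hs2 : pvSorted d2 := List.Pairwise.sublist (List.dropWhile_sublist _) h2
    rw [ih hs1 hs2]
    have hcx : (((y :: ys).count y : Nat) : Int) = (t2.length : Int) := by
      conv_lhs => rw [← he2]
      rw [List.count_append, pvCount_eq_zero_of_gt hgt2]
      have : t2.count y = t2.length :=
        List.count_eq_length.mpr (fun b hb => (htx2 b hb).symm)
      simp [this]
    have hd : pvS d1 (y :: ys) = pvS d1 d2 := by
      apply pvS_congr_right
      intro z hz
      conv_lhs => rw [← he2]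
      rw [List.count_append]
      have : t2.count z = 0 := by
        rw [List.count_eq_zero]
        intro hzt
        have hgt := hgt1 z hz
        rw [htx2 z hzt, pvLt_iff] at hgt; omega
      omega
    conv_rhs => rw [← he1]
    rw [pvS_append, pvS_const htx1, hcx, hd]

-- permutation invariance of pvS in both arguments
theorem pvS_perm {l1 l1' l2 l2' : List (Int × Int)} (p1 : l1.Perm l1') (p2 : l2.Perm l2') :
    pvS l1 l2 = pvS l1' l2' := by
  unfold pvS
  rw [(p1.map _).sum_eq]
  congr 1
  exact List.map_congr_left (fun z _ => by rw [p2.count_eq z])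

theorem pvSorted_mergeSort (l : List (Int × Int)) :
    pvSorted (l.mergeSort (fun a b => !pvLt b a)) := by
  apply List.pairwise_mergeSort
  · intro a b c hab hbc
    rw [pvLe_iff, pvLt_iff] at hab hbc ⊢
    rcases a with ⟨a1, a2⟩; rcases b with ⟨b1, b2⟩; rcases c with ⟨c1, c2⟩
    simp at hab hbc ⊢; omega
  · intro a b
    rcases h : pvLt b a
    · simp
    · rw [pvLt_iff] at h
      have : ¬ pvLt a b = true := by
        rw [pvLt_iff]
        rcases a with ⟨a1, a2⟩; rcases b with ⟨b1, b2⟩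
        simp at h ⊢; omega
      simp [this]

-- ===== VERDICT (by name: the statement is the Claim_ definition above) =====
theorem calc_shared_edges_spec : Claim_equal_calc_shared_edges := by
  intro cycle cycle_ref _
  unfold Spec_calc_shared_edges calc_shared_edges_alt
  rw [pvA_char,
    pvMergeCount_eq _ _ (pvSorted_mergeSort _) (pvSorted_mergeSort _),
    pvS_perm (List.mergeSort_perm _ _) (List.mergeSort_perm _ _)]
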